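-- pv_equiv track=rewrite | github.com/jongeunShin95/algorithm | programmers/할인 행사.py | solution
-- ===== SOURCE A (Python) =====
-- import copy
--
-- def solution(want, number, discount):
--     answer = 0
--     want_dict = {}
--     for i in range(len(want)): want_dict[want[i]] = number[i]
--
--     for i in range(len(discount) - 9):
--         f = False
--         copy_dict = copy.deepcopy(want_dict)
--
--         for j in range(i, i + 10):
--             if discount[j] in copy_dict:
--                 copy_dict[discount[j]] -= 1
--
--         for k, v in copy_dict.items():
--             if v > 0:
--                 f = True
--                 break
--
--         if f == False: answer += 1
--
--
--
--     return answer
-- ===== SOURCE B (Python) =====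
-- def solution(want, number, discount):
--     # Sliding window of 10 days with incremental per-item counts and a
--     # running number of still-unsatisfied wanted items (no per-window rescan).
--     need = {}
--     for w, x in zip(want, number):
--         need[w] = x
--     bad = 0
--     for v in need.values():
--         if v > 0:
--             bad += 1
--     cnt = {}
--     for k in need:
--         cnt[k] = 0
--     ans = 0
--     for i, item in enumerate(discount):
--         if item in need:
--             c = cnt[item] + 1
--             cnt[item] = c
--             if c == need[item]:
--                 bad -= 1
--         if i >= 10:
--             old = discount[i - 10]
--             if old in need:
--                 c = cnt[old]
--                 if c == need[old]:
--                     bad += 1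
--                 cnt[old] = c - 1
--         if i >= 9 and bad == 0:
--             ans += 1
--     return ans
-- ===== Notes on version B (the rewrite author's own statement) =====
-- stated objective: faster
-- what changed: A deep-copies the wanted-quantities dict and rescans all 10 days plus all wanted items for every window start; B makes a single sliding-window pass over discount, incrementally updating per-item counts and a running count of still-unsatisfied wanted items.
import Mathlib
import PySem

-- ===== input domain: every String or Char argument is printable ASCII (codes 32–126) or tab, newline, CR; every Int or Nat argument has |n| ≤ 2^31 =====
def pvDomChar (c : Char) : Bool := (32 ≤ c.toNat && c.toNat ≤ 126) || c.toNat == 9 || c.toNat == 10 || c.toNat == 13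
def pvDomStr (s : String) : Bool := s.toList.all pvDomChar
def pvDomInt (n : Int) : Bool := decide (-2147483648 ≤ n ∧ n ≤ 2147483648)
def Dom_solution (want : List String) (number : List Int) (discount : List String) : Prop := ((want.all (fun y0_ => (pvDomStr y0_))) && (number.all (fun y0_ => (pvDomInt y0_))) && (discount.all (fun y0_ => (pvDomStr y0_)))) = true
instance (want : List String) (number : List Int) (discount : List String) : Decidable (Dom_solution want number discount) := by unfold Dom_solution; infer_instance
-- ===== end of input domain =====

-- B replaces A's per-window dict deepcopy + rescan by a single sliding-window pass with
-- incremental item counts and a running count of unsatisfied wanted items (objective: faster).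


-- ===== PORT A =====
def solution (want : List String) (number : List Int) (discount : List String) : Int :=
  let want_dict : PySem.Dict String Int :=
    (PySem.List.pyRange 0 (want.length : Int)).foldl
      (fun d i => d.insert (PySem.List.pyGetD want i "") (PySem.List.pyGetD number i 0))
      PySem.Dict.empty
  (PySem.List.pyRange 0 ((discount.length : Int) - 9)).foldl
    (fun answer i =>
      -- copy.deepcopy(want_dict) then the j-loop; the guarded 'copy_dict[discount[j]] -= 1'
      -- is Dict.modify on a key the guard proved present
      let copy_dict :=
        (PySem.List.pyRange i (i + 10)).foldl
          (fun d j =>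
            if d.contains (PySem.List.pyGetD discount j "") then
              d.modify (PySem.List.pyGetD discount j "") 0 (fun v => v - 1)
            else d)
          want_dict
      -- the k,v-loop with break sets f iff some remaining value is > 0
      let f := copy_dict.items.any (fun kv => decide (0 < kv.2))
      if f = false then answer + 1 else answer)
    0

-- ===== PORT B =====
-- one step of B's enumerate loop: add today's item, drop the item leaving the window,
-- update the running count 'bad' of not-yet-satisfied wanted items, count full good windows
def stepB (need : PySem.Dict String Int) (discount : List String)
    (st : PySem.Dict String Int × Int × Int) (p : Int × String) :
    PySem.Dict String Int × Int × Int :=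
  let s1 : PySem.Dict String Int × Int :=
    if need.contains p.2 then
      let c := st.1.getD p.2 0 + 1
      (st.1.insert p.2 c, if c = need.getD p.2 0 then st.2.1 - 1 else st.2.1)
    else (st.1, st.2.1)
  let s2 : PySem.Dict String Int × Int :=
    if 10 ≤ p.1 then
      let old := PySem.List.pyGetD discount (p.1 - 10) ""
      if need.contains old then
        let c := s1.1.getD old 0
        (s1.1.insert old (c - 1), if c = need.getD old 0 then s1.2 + 1 else s1.2)
      else s1
    else s1
  (s2.1, s2.2, if 9 ≤ p.1 ∧ s2.2 = 0 then st.2.2 + 1 else st.2.2)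

def solution_alt (want : List String) (number : List Int) (discount : List String) : Int :=
  let need : PySem.Dict String Int :=
    (want.zip number).foldl (fun d p => d.insert p.1 p.2) PySem.Dict.empty
  let bad : Int := need.values.foldl (fun b v => if 0 < v then b + 1 else b) 0
  let cnt : PySem.Dict String Int :=
    need.keys.foldl (fun d k => d.insert k (0 : Int)) PySem.Dict.empty
  ((PySem.List.enumerate discount).foldl (stepB need discount) (cnt, bad, 0)).2.2

-- ===== PRECONDITION & SPEC =====
-- Pre_ excludes inputs with len(want) > len(number): there A raises IndexError on number[i].
def Pre_solution (want : List String) (number : List Int) (discount : List String) : Prop :=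
  want.length ≤ number.length
instance (want : List String) (number : List Int) (discount : List String) : Decidable (Pre_solution want number discount) := by unfold Pre_solution; infer_instance
def pvWitness_solution : List String × List Int × List String :=
  (["a", "b"], [2, 1], ["a", "b", "a", "c", "a", "b", "a", "a", "b", "a", "b", "c"])

def Spec_solution (want : List String) (number : List Int) (discount : List String) (out : Int) : Prop := out = solution_alt want number discount
instance (want : List String) (number : List Int) (discount : List String) (out : Int) : Decidable (Spec_solution want number discount out) := by unfold Spec_solution; infer_instance

-- ===== CLAIM (what is proved, stated in full; the proofs are below) =====
def Claim_equal_solution : Prop := ∀ (want : List String) (number : List Int) (discount : List String), Dom_solution want number discount → Pre_solution want number discount → Spec_solution want number discount (solution want number discount)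
-- ===== LEMMAS AND PROOFS =====

-- the wanted-quantities dict, as B builds it (= A's dict under Pre_, lemma wd_eq below)
def ndict (want : List String) (number : List Int) : PySem.Dict String Int :=
  (want.zip number).foldl (fun d p => d.insert p.1 p.2) PySem.Dict.empty

-- the 10-day window starting at day s
def win (discount : List String) (s : Nat) : List String := (discount.drop s).take 10

-- window of the first t processed days (its last ≤ 10 entries)
def wint (discount : List String) (t : Nat) : List String :=
  (discount.take t).drop (t - 10)

-- 'window L satisfies every wanted quantity'
def goodB (nd : PySem.Dict String Int) (L : List String) : Bool :=
  nd.items.all (fun kv => decide (kv.2 ≤ (L.count kv.1 : Int)))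

-- number of wanted items not yet satisfied by window L
def badC (nd : PySem.Dict String Int) (L : List String) : Nat :=
  nd.items.countP (fun kv => decide ((L.count kv.1 : Int) < kv.2))

-- the common specification both programs compute
def specC (nd : PySem.Dict String Int) (discount : List String) : Int :=
  ((List.range (discount.length - 9)).countP (fun s => goodB nd (win discount s)) : Int)

theorem nd_keys_nodup (want : List String) (number : List Int) :
    (ndict want number).keys.Nodup := by
  exact PySem.Dict.nodup_keys_foldl_insert_key (want.zip number) Prod.fst (fun _ p => p.2)
    PySem.Dict.empty PySem.Dict.nodup_keys_empty

theorem wd_eq (want : List String) (number : List Int)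
    (h : want.length ≤ number.length) :
    (PySem.List.pyRange 0 (want.length : Int)).foldl
      (fun d i => d.insert (PySem.List.pyGetD want i "") (PySem.List.pyGetD number i 0))
      PySem.Dict.empty = ndict want number := by
  unfold ndict
  have hmap : (List.range want.length).map
      (fun (k : Nat) => (PySem.List.pyGetD want (k : Int) "", PySem.List.pyGetD number (k : Int) 0)) =
      want.zip number := by
    apply List.ext_getElem
    · simp; omega
    · intro i h1 h2
      have hw : i < want.length := by simpa using h1
      have hn : i < number.length := by omega
      simp [PySem.List.pyGetD_natCast, List.getD,
        List.getElem?_eq_getElem hw, List.getElem?_eq_getElem hn, List.getElem_zip]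
  rw [PySem.List.pyRange_zero_natCast, List.foldl_map, ← hmap, List.foldl_map]


def decFold (d : PySem.Dict String Int) (ws : List String) : PySem.Dict String Int :=
  ws.foldl (fun d x => if d.contains x then d.modify x 0 (fun v => v - 1) else d) d

theorem decFold_keys (ws : List String) (d : PySem.Dict String Int) :
    (decFold d ws).keys = d.keys := by
  induction ws generalizing d with
  | nil => rfl
  | cons x t ih =>
    simp only [decFold, List.foldl_cons]
    by_cases hx : d.contains x
    · simp only [hx, if_pos]
      rw [show (List.foldl _ _ t : PySem.Dict String Int) = decFold (d.modify x 0 (fun v => v - 1)) t from rfl, ih]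
      rw [PySem.Dict.keys_modify, PySem.Dict.keys_insert_of_contains _ _ hx]
    · simp only [hx]; exact ih d

theorem decFold_getD (ws : List String) (d : PySem.Dict String Int) (k : String) :
    (decFold d ws).getD k 0 =
      if d.contains k then d.getD k 0 - (ws.count k : Int) else d.getD k 0 := by
  induction ws generalizing d with
  | nil => simp [decFold]
  | cons x t ih =>
    simp only [decFold, List.foldl_cons]
    by_cases hx : d.contains x
    · simp only [hx, if_pos]
      rw [show (List.foldl _ _ t : PySem.Dict String Int) = decFold (d.modify x 0 (fun v => v - 1)) t from rfl, ih]
      have hc : (d.modify x 0 (fun v => v - 1)).contains k = d.contains k := by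
        rw [PySem.Dict.contains_modify]
        by_cases hkx : k = x
        · subst hkx; simp [hx]
        · simp [hkx]
      rw [hc, PySem.Dict.getD_modify]
      by_cases hkx : k = x
      · subst hkx
        simp [hx, List.count_cons_self]
        push_cast
        ring
      · simp [hkx, List.count_cons_of_ne (by exact fun h => hkx h.symm)]
    · rw [show (if d.contains x = true then d.modify x 0 (fun v => v - 1) else d) = d from if_neg hx]
      rw [show (List.foldl _ _ t : PySem.Dict String Int) = decFold d t from rfl, ih]
      by_cases hkx : k = x
      · subst hkx; simp [hx]
      · simp [List.count_cons_of_ne (fun h => hkx h.symm)]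


-- map of pyGetD over a consecutive Int range is a take of a drop
theorem map_pyGetD_subrange (xs : List String) (s m : Nat) (h : s + m ≤ xs.length) :
    (PySem.List.pyRange (s : Int) ((s : Int) + (m : Int))).map
      (fun j => PySem.List.pyGetD xs j "") = (xs.drop s).take m := by
  induction m with
  | zero => simp [PySem.List.pyRange]
  | succ m ih =>
    have h1 : (s : Int) + (m : Int) = ((s + m : Nat) : Int) := by push_cast; ring
    have hr : PySem.List.pyRange (s : Int) ((s : Int) + ((m : Nat) + 1 : Int)) =
        PySem.List.pyRange (s : Int) ((s : Int) + (m : Int)) ++ [(s : Int) + m] := by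
      rw [show (s : Int) + ((m : Nat) + 1 : Int) = ((s : Int) + (m : Int)) + 1 by push_cast; ring]
      exact PySem.List.pyRange_one_succ_right (by omega)
    rw [show ((m + 1 : Nat) : Int) = ((m : Nat) + 1 : Int) by push_cast; ring, hr,
      List.map_append, ih (by omega)]
    have hsm : s + m < xs.length := by omega
    have : PySem.List.pyGetD xs ((s : Int) + (m : Int)) "" = xs[s + m] := by
      rw [h1, PySem.List.pyGetD_natCast, List.getD, List.getElem?_eq_getElem hsm]; rfl
    simp only [List.map_cons, List.map_nil, this]
    rw [List.take_add_one]
    congr 1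
    have : (xs.drop s)[m]? = some xs[s + m] := by
      rw [List.getElem?_drop, List.getElem?_eq_getElem (by omega)]
    simp [this]

theorem anyItems_decFold (nd : PySem.Dict String Int) (hnd : nd.keys.Nodup) (L : List String) :
    ((decFold nd L).items.any (fun kv => decide (0 < kv.2))) = !goodB nd L := by
  have hk : (decFold nd L).keys.Nodup := by rw [decFold_keys]; exact hnd
  unfold goodB
  rw [PySem.Dict.items_eq_map_keys _ hk 0, PySem.Dict.items_eq_map_keys nd hnd 0,
    List.any_map, List.all_map, decFold_keys]
  cases hall : nd.keys.all ((fun kv => decide (kv.2 ≤ (L.count kv.1 : Int))) ∘ fun k => (k, nd.getD k 0)) with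
  | true =>
    simp only [Bool.not_true]
    rw [List.all_eq_true] at hall
    rw [List.any_eq_false]
    intro k hkmem
    have hc : nd.contains k = true := (PySem.Dict.contains_iff_mem_keys nd k).2 hkmem
    have := hall k hkmem
    simp only [Function.comp, decide_eq_true_eq] at this ⊢
    rw [decFold_getD, hc, if_pos rfl]
    omega
  | false =>
    simp only [Bool.not_false]
    rw [List.all_eq_false] at hall
    obtain ⟨k, hkmem, hbad⟩ := hall
    rw [List.any_eq_true]
    refine ⟨k, hkmem, ?_⟩
    have hc : nd.contains k = true := (PySem.Dict.contains_iff_mem_keys nd k).2 hkmem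
    simp only [Function.comp, decide_eq_true_eq] at hbad ⊢
    rw [decFold_getD, hc, if_pos rfl]
    omega

theorem foldl_if_false_count (l : List Nat) (C : Nat → Bool) (a : Int) :
    l.foldl (fun acc k => if C k = false then acc + 1 else acc) a
      = a + (l.countP (fun k => !C k) : Int) := by
  induction l generalizing a with
  | nil => simp
  | cons x t ih =>
    simp only [List.foldl_cons, List.countP_cons]
    cases hx : C x <;> simp [ih, hx] <;> push_cast <;> ring

theorem solution_eq_spec (want : List String) (number : List Int) (discount : List String)
    (h : want.length ≤ number.length) :
    solution want number discount = specC (ndict want number) discount := by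
  unfold solution specC
  rw [wd_eq want number h]
  by_cases hn : discount.length ≤ 9
  · rw [PySem.List.pyRange_one_eq_nil (by omega), show discount.length - 9 = 0 by omega]
    simp
  · rw [show ((discount.length : Int) - 9) = ((discount.length - 9 : Nat) : Int) by omega,
      PySem.List.pyRange_zero_natCast, List.foldl_map, foldl_if_false_count]
    have hcong : (List.range (discount.length - 9)).countP
        (fun k => !((PySem.List.pyRange ((k : Nat) : Int) (((k : Nat) : Int) + 10)).foldl
            (fun d j =>
              if d.contains (PySem.List.pyGetD discount j "") then
                d.modify (PySem.List.pyGetD discount j "") 0 (fun v => v - 1)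
              else d)
            (ndict want number)).items.any (fun kv => decide (0 < kv.2)))
        = (List.range (discount.length - 9)).countP
            (fun s => goodB (ndict want number) (win discount s)) := by
      apply List.countP_congr
      intro s hs
      have hs' : s + 10 ≤ discount.length := by
        rw [List.mem_range] at hs; omega
      have hfold : (PySem.List.pyRange ((s : Nat) : Int) (((s : Nat) : Int) + 10)).foldl
          (fun d j =>
            if d.contains (PySem.List.pyGetD discount j "") then
              d.modify (PySem.List.pyGetD discount j "") 0 (fun v => v - 1)
            else d)
          (ndict want number) = decFold (ndict want number) (win discount s) := by
        unfold decFold win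
        rw [← map_pyGetD_subrange discount s 10 hs', List.foldl_map]
        push_cast
        rfl
      rw [hfold, anyItems_decFold _ (nd_keys_nodup want number), Bool.not_not]
    rw [hcong]
    omega

-- ---- B side ----

-- B's initial counter dict and initial bad counter, and its run after t days
def cnt0 (nd : PySem.Dict String Int) : PySem.Dict String Int :=
  nd.keys.foldl (fun d k => d.insert k (0 : Int)) PySem.Dict.empty

def bad0 (nd : PySem.Dict String Int) : Int :=
  nd.values.foldl (fun b v => if 0 < v then b + 1 else b) 0

def runB (nd : PySem.Dict String Int) (discount : List String) (t : Nat) :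
    PySem.Dict String Int × Int × Int :=
  (PySem.List.enumerate (discount.take t)).foldl (stepB nd discount) (cnt0 nd, bad0 nd, 0)

-- the loop invariant of B after t processed days
def InvB (nd : PySem.Dict String Int) (discount : List String) (t : Nat)
    (st : PySem.Dict String Int × Int × Int) : Prop :=
  st.1.keys = nd.keys ∧
  (∀ k ∈ nd.keys, st.1.getD k 0 = ((wint discount t).count k : Int)) ∧
  st.2.1 = (badC nd (wint discount t) : Int) ∧
  st.2.2 = ((List.range (t - 9)).countP (fun s => goodB nd (win discount s)) : Int)

theorem foldl_count_if_pos (l : List Int) (a : Int) :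
    l.foldl (fun b v => if 0 < v then b + 1 else b) a
      = a + (l.countP (fun v => decide (0 < v)) : Int) := by
  induction l generalizing a with
  | nil => simp
  | cons x t ih =>
    simp only [List.foldl_cons, List.countP_cons]
    by_cases hx : (0 : Int) < x <;> simp [ih, hx] <;> push_cast <;> ring

theorem countP_update_key (l : List (String × Int)) (hnd : (l.map Prod.fst).Nodup)
    (x : String) (v : Int) (hmem : (x, v) ∈ l) (p q : String × Int → Bool)
    (hagree : ∀ kv ∈ l, kv.1 ≠ x → p kv = q kv) :
    (l.countP q : Int) = l.countP p + (if q (x, v) then 1 else 0) - (if p (x, v) then 1 else 0) := by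
  induction l with
  | nil => simp at hmem
  | cons hd tl ih =>
    simp only [List.map_cons, List.nodup_cons] at hnd
    by_cases hhd : hd.1 = x
    · have hhd' : hd = (x, v) := by
        rcases List.mem_cons.1 hmem with h | h
        · exact h.symm
        · exact absurd (by rw [hhd] at *; exact List.mem_map_of_mem h) hnd.1
      have htl : ∀ kv ∈ tl, p kv = q kv := by
        intro kv hkv
        refine hagree kv (List.mem_cons_of_mem _ hkv) (fun hc => ?_)
        exact hnd.1 (by rw [hhd, ← hc]; exact List.mem_map_of_mem hkv)
      have hcong : List.countP q tl = List.countP p tl :=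
        List.countP_congr (fun kv hkv => by simp [htl kv hkv])
      subst hhd'
      rw [List.countP_cons, List.countP_cons, hcong]
      by_cases hq : q (x, v) = true <;> by_cases hp : p (x, v) = true <;>
        simp [hq, hp] <;> push_cast <;> omega
    · have hmem' : (x, v) ∈ tl := by
        rcases List.mem_cons.1 hmem with h | h
        · exact absurd (congrArg Prod.fst h.symm) hhd
        · exact h
      have hph : p hd = q hd := hagree hd List.mem_cons_self hhd
      have hrec := ih hnd.2 hmem'
        (fun kv hkv hne => hagree kv (List.mem_cons_of_mem _ hkv) hne)
      rw [List.countP_cons, List.countP_cons]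
      by_cases hq : q (x, v) = true <;> by_cases hp : p (x, v) = true <;>
        by_cases hqh : q hd = true <;>
          simp [hq, hp, hqh, hph] at hrec ⊢ <;> push_cast <;> omega

theorem badC_zero_iff_goodB (nd : PySem.Dict String Int) (L : List String) :
    badC nd L = 0 ↔ goodB nd L = true := by
  unfold badC goodB
  rw [List.countP_eq_zero, List.all_eq_true]
  constructor <;> intro hh kv hkv <;> have := hh kv hkv <;>
    simp only [decide_eq_true_eq] at * <;> omega

-- the add-block of stepB updates counts and bad from window L to L ++ [x]
theorem add_block (nd : PySem.Dict String Int) (hnd : nd.keys.Nodup)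
    (cnt : PySem.Dict String Int) (bad : Int) (L : List String) (x : String)
    (hkeys : cnt.keys = nd.keys)
    (hcnt : ∀ k ∈ nd.keys, cnt.getD k 0 = (L.count k : Int))
    (hbad : bad = (badC nd L : Int))
    (s1 : PySem.Dict String Int × Int)
    (hs1 : s1 = if nd.contains x then
        (cnt.insert x (cnt.getD x 0 + 1),
          if cnt.getD x 0 + 1 = nd.getD x 0 then bad - 1 else bad)
      else (cnt, bad)) :
    s1.1.keys = nd.keys ∧
    (∀ k ∈ nd.keys, s1.1.getD k 0 = ((L ++ [x]).count k : Int)) ∧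
    s1.2 = (badC nd (L ++ [x]) : Int) := by
  have hfst : nd.items.map Prod.fst = nd.keys := rfl
  subst hs1
  by_cases hx : nd.contains x = true
  · have hxk : x ∈ nd.keys := (PySem.Dict.contains_iff_mem_keys nd x).1 hx
    have hcntx : cnt.contains x = true := by
      rw [PySem.Dict.contains_iff_mem_keys, hkeys]; exact hxk
    rw [if_pos hx]
    refine ⟨?_, ?_, ?_⟩
    · rw [PySem.Dict.keys_insert_of_contains _ _ hcntx, hkeys]
    · intro k hk
      rw [PySem.Dict.getD_insert]
      by_cases hkx : k = x
      · subst hkx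
        rw [if_pos rfl, hcnt k hk, List.count_append]
        simp
      · rw [if_neg hkx, hcnt k hk, List.count_append]
        have h0 : List.count k [x] = 0 := by simp [List.count_singleton, Ne.symm hkx]
        rw [h0]
        simp
    · have hmem : (x, nd.getD x 0) ∈ nd.items := by
        rw [PySem.Dict.items_eq_map_keys nd hnd 0]
        exact List.mem_map_of_mem hxk
      have hagree : ∀ kv ∈ nd.items, kv.1 ≠ x →
          (fun kv : String × Int => decide ((L.count kv.1 : Int) < kv.2)) kv =
            (fun kv : String × Int => decide (((L ++ [x]).count kv.1 : Int) < kv.2)) kv := by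
        intro kv _ hne
        have h0 : List.count kv.1 [x] = 0 := by simp [List.count_singleton, Ne.symm hne]
        simp only [List.count_append, h0, Nat.add_zero]
      have hupd := countP_update_key nd.items (hfst ▸ hnd) x (nd.getD x 0) hmem _ _ hagree
      unfold badC
      rw [hupd, hbad, hcnt x hxk]
      unfold badC
      have hca : (List.count x (L ++ [x]) : Int) = (L.count x : Int) + 1 := by
        rw [List.count_append]; simp
      simp only [decide_eq_true_eq, hca]
      split_ifs <;> omega
  · rw [if_neg hx]
    have hxk : x ∉ nd.keys := fun hm => hx ((PySem.Dict.contains_iff_mem_keys nd x).2 hm)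
    have hsame : ∀ k ∈ nd.keys, (L ++ [x]).count k = L.count k := by
      intro k hk
      have hkx : k ≠ x := fun hc => hxk (hc ▸ hk)
      rw [List.count_append]
      simp [List.count_singleton, Ne.symm hkx]
    refine ⟨hkeys, ?_, ?_⟩
    · intro k hk
      rw [hcnt k hk, hsame k hk]
    · show bad = _
      rw [hbad]
      unfold badC
      congr 1
      apply List.countP_congr
      intro kv hkv
      rw [hsame kv.1 (PySem.Dict.mem_keys_of_mem_items nd hkv)]

-- the remove-block of stepB updates counts and bad from window old :: L2 to L2
theorem remove_block (nd : PySem.Dict String Int) (hnd : nd.keys.Nodup)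
    (cnt : PySem.Dict String Int) (bad : Int) (old : String) (L2 : List String)
    (hkeys : cnt.keys = nd.keys)
    (hcnt : ∀ k ∈ nd.keys, cnt.getD k 0 = ((old :: L2).count k : Int))
    (hbad : bad = (badC nd (old :: L2) : Int))
    (s2 : PySem.Dict String Int × Int)
    (hs2 : s2 = if nd.contains old then
        (cnt.insert old (cnt.getD old 0 - 1),
          if cnt.getD old 0 = nd.getD old 0 then bad + 1 else bad)
      else (cnt, bad)) :
    s2.1.keys = nd.keys ∧
    (∀ k ∈ nd.keys, s2.1.getD k 0 = (L2.count k : Int)) ∧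
    s2.2 = (badC nd L2 : Int) := by
  have hfst : nd.items.map Prod.fst = nd.keys := rfl
  subst hs2
  by_cases hx : nd.contains old = true
  · have hxk : old ∈ nd.keys := (PySem.Dict.contains_iff_mem_keys nd old).1 hx
    have hcntx : cnt.contains old = true := by
      rw [PySem.Dict.contains_iff_mem_keys, hkeys]; exact hxk
    rw [if_pos hx]
    refine ⟨?_, ?_, ?_⟩
    · rw [PySem.Dict.keys_insert_of_contains _ _ hcntx, hkeys]
    · intro k hk
      rw [PySem.Dict.getD_insert]
      by_cases hkx : k = old
      · subst hkx
        rw [if_pos rfl, hcnt k hk, List.count_cons_self]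
        push_cast; ring
      · rw [if_neg hkx, hcnt k hk, List.count_cons_of_ne (fun h => hkx h.symm)]
    · have hmem : (old, nd.getD old 0) ∈ nd.items := by
        rw [PySem.Dict.items_eq_map_keys nd hnd 0]
        exact List.mem_map_of_mem hxk
      have hagree : ∀ kv ∈ nd.items, kv.1 ≠ old →
          (fun kv : String × Int => decide (((old :: L2).count kv.1 : Int) < kv.2)) kv =
            (fun kv : String × Int => decide ((L2.count kv.1 : Int) < kv.2)) kv := by
        intro kv _ hne
        simp only []
        rw [List.count_cons_of_ne (fun h => hne h.symm)]
      have hupd := countP_update_key nd.items (hfst ▸ hnd) old (nd.getD old 0) hmem _ _ hagree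
      unfold badC
      rw [hupd, hbad, hcnt old hxk]
      unfold badC
      have hca : (List.count old (old :: L2) : Int) = (L2.count old : Int) + 1 := by
        rw [List.count_cons_self]; push_cast; ring
      simp only [decide_eq_true_eq, hca]
      split_ifs <;> omega
  · rw [if_neg hx]
    have hxk : old ∉ nd.keys := fun hm => hx ((PySem.Dict.contains_iff_mem_keys nd old).2 hm)
    have hsame : ∀ k ∈ nd.keys, (old :: L2).count k = L2.count k := by
      intro k hk
      exact List.count_cons_of_ne (fun h => hxk (by rw [h]; exact hk))
    refine ⟨hkeys, ?_, ?_⟩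
    · intro k hk
      rw [hcnt k hk, hsame k hk]
    · show bad = _
      rw [hbad]
      unfold badC
      congr 1
      apply List.countP_congr
      intro kv hkv
      rw [hsame kv.1 (PySem.Dict.mem_keys_of_mem_items nd hkv)]

theorem foldl_insert_zero_getD (l : List String) (d : PySem.Dict String Int)
    (hd : ∀ k, d.getD k 0 = 0) (k : String) :
    (l.foldl (fun d k => d.insert k (0 : Int)) d).getD k 0 = 0 := by
  induction l generalizing d with
  | nil => exact hd k
  | cons x t ih =>
    simp only [List.foldl_cons]
    exact ih _ (fun k' => by rw [PySem.Dict.getD_insert]; split_ifs <;> [rfl; exact hd k'])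

theorem InvB_zero (nd : PySem.Dict String Int) (hnd : nd.keys.Nodup) (discount : List String) :
    InvB nd discount 0 (cnt0 nd, bad0 nd, 0) := by
  refine ⟨?_, ?_, ?_, ?_⟩
  · show (cnt0 nd).keys = nd.keys
    unfold cnt0
    rw [PySem.Dict.keys_foldl_insert]
    show PySem.Set.update PySem.Dict.empty.keys nd.keys = nd.keys
    rw [show (PySem.Dict.empty : PySem.Dict String Int).keys = ([] : List String) from rfl]
    rw [PySem.Set.update_nil_left, PySem.Set.ofList_eq_self_of_nodup _ hnd]
  · intro k _
    show (cnt0 nd).getD k 0 = ((wint discount 0).count k : Int)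
    unfold cnt0 wint
    rw [foldl_insert_zero_getD _ _ (fun k' => PySem.Dict.getD_empty k' 0)]
    simp
  · show bad0 nd = (badC nd (wint discount 0) : Int)
    unfold bad0 badC wint
    rw [foldl_count_if_pos]
    simp only [List.take_zero, List.drop_nil]
    rw [show (PySem.Dict.values nd) = nd.items.map Prod.snd from rfl, List.countP_map]
    norm_num
    apply List.countP_congr
    intro kv _
    simp [List.count_nil]
  · simp

theorem wint_succ_small (discount : List String) (t : Nat) (ht : t < discount.length)
    (h9 : t ≤ 9) : wint discount (t + 1) = wint discount t ++ [discount[t]] := by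
  unfold wint
  rw [show t + 1 - 10 = 0 by omega, show t - 10 = 0 by omega]
  simp only [List.drop_zero]
  rw [List.take_add_one, List.getElem?_eq_getElem ht]
  rfl

theorem wint_succ_large (discount : List String) (t : Nat) (ht : t < discount.length)
    (h10 : 10 ≤ t) :
    wint discount t ++ [discount[t]] =
      discount[t - 10]'(by omega) :: wint discount (t + 1) := by
  unfold wint
  have hlen : (discount.take t).length = t := by simp; omega
  rw [show t + 1 - 10 = t - 9 by omega]
  rw [List.take_add_one, List.getElem?_eq_getElem ht]
  simp only [Option.toList_some]
  rw [List.drop_append_of_le_length (by omega)]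
  rw [List.drop_eq_getElem_cons (by omega : t - 10 < (discount.take t).length)]
  rw [show t - 10 + 1 = t - 9 by omega]
  rw [List.getElem_take]
  rfl

theorem wint_eq_win (discount : List String) (t : Nat) (ht : t < discount.length)
    (h9 : 9 ≤ t) : wint discount (t + 1) = win discount (t - 9) := by
  unfold wint win
  rw [show t + 1 - 10 = t - 9 by omega, List.drop_take, show t + 1 - (t - 9) = 10 by omega]

theorem ans_update (nd : PySem.Dict String Int) (discount : List String) (t : Nat)
    (ht : t < discount.length) (b ans : Int)
    (hb : b = (badC nd (wint discount (t + 1)) : Int))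
    (hans : ans = ((List.range (t - 9)).countP (fun s => goodB nd (win discount s)) : Int)) :
    (if 9 ≤ (t : Int) ∧ b = 0 then ans + 1 else ans)
      = ((List.range (t + 1 - 9)).countP (fun s => goodB nd (win discount s)) : Int) := by
  by_cases h9 : 9 ≤ t
  · rw [show t + 1 - 9 = (t - 9) + 1 by omega, List.range_succ, List.countP_append]
    have hw : wint discount (t + 1) = win discount (t - 9) := wint_eq_win discount t ht h9
    by_cases hg : goodB nd (win discount (t - 9)) = true
    · have hb0 : b = 0 := by
        rw [hb, hw]
        exact_mod_cast congrArg Nat.cast ((badC_zero_iff_goodB nd _).2 hg)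
      rw [if_pos ⟨by exact_mod_cast h9, hb0⟩, hans]
      simp [hg]
    · have hb0 : b ≠ 0 := by
        rw [hb, hw]
        intro hc
        exact hg ((badC_zero_iff_goodB nd _).1 (by exact_mod_cast hc))
      rw [if_neg (fun hcon => hb0 hcon.2), hans]
      simp [hg]
  · rw [if_neg (fun hcon => h9 (by exact_mod_cast hcon.1)), hans,
      show t + 1 - 9 = t - 9 by omega]

theorem InvB_step (nd : PySem.Dict String Int) (hnd : nd.keys.Nodup)
    (discount : List String) (t : Nat) (ht : t < discount.length)
    (st : PySem.Dict String Int × Int × Int) (hInv : InvB nd discount t st) :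
    InvB nd discount (t + 1) (stepB nd discount st ((t : Int), discount[t])) := by
  obtain ⟨hkeys, hcnt, hbad, hans⟩ := hInv
  set x := discount[t] with hxdef
  set s1 : PySem.Dict String Int × Int :=
    if nd.contains x then
      (st.1.insert x (st.1.getD x 0 + 1),
        if st.1.getD x 0 + 1 = nd.getD x 0 then st.2.1 - 1 else st.2.1)
    else (st.1, st.2.1) with hs1
  obtain ⟨hk1, hc1, hb1⟩ :=
    add_block nd hnd st.1 st.2.1 (wint discount t) x hkeys hcnt hbad s1 hs1
  by_cases h10 : 10 ≤ t
  · -- a day leaves the window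
    have hold : PySem.List.pyGetD discount ((t : Int) - 10) "" = discount[t - 10]'(by omega) := by
      rw [show ((t : Int) - 10) = ((t - 10 : Nat) : Int) by omega, PySem.List.pyGetD_natCast,
        List.getD, List.getElem?_eq_getElem (by omega : t - 10 < discount.length)]
      rfl
    have hlarge := wint_succ_large discount t ht h10
    rw [← hxdef] at hlarge
    have hc1' : ∀ k ∈ nd.keys, s1.1.getD k 0 =
        ((discount[t - 10]'(by omega) :: wint discount (t + 1)).count k : Int) := by
      intro k hk
      rw [hc1 k hk, hlarge]
    have hb1' : s1.2 = (badC nd (discount[t - 10]'(by omega) :: wint discount (t + 1)) : Int) := by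
      rw [hb1, hlarge]
    set s2 : PySem.Dict String Int × Int :=
      if nd.contains (discount[t - 10]'(by omega)) then
        (s1.1.insert (discount[t - 10]'(by omega)) (s1.1.getD (discount[t - 10]'(by omega)) 0 - 1),
          if s1.1.getD (discount[t - 10]'(by omega)) 0 = nd.getD (discount[t - 10]'(by omega)) 0
            then s1.2 + 1 else s1.2)
      else (s1.1, s1.2) with hs2
    obtain ⟨hk2, hc2, hb2⟩ :=
      remove_block nd hnd s1.1 s1.2 (discount[t - 10]'(by omega)) (wint discount (t + 1))
        hk1 hc1' hb1' s2 hs2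
    have hstep : stepB nd discount st ((t : Int), x) =
        (s2.1, s2.2, if 9 ≤ (t : Int) ∧ s2.2 = 0 then st.2.2 + 1 else st.2.2) := by
      simp only [stepB]
      rw [if_pos (show (10 : Int) ≤ (t : Int) by exact_mod_cast h10), hold]
    rw [hstep]
    exact ⟨hk2, hc2, hb2, ans_update nd discount t ht s2.2 st.2.2 hb2 hans⟩
  · -- the window only grows
    have hsmall := wint_succ_small discount t ht (by omega)
    rw [← hxdef] at hsmall
    have hc1' : ∀ k ∈ nd.keys, s1.1.getD k 0 = ((wint discount (t + 1)).count k : Int) := by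
      intro k hk
      rw [hc1 k hk, hsmall]
    have hb1' : s1.2 = (badC nd (wint discount (t + 1)) : Int) := by rw [hb1, hsmall]
    have hstep : stepB nd discount st ((t : Int), x) =
        (s1.1, s1.2, if 9 ≤ (t : Int) ∧ s1.2 = 0 then st.2.2 + 1 else st.2.2) := by
      simp only [stepB]
      rw [if_neg (show ¬ (10 : Int) ≤ (t : Int) by exact_mod_cast h10)]
    rw [hstep]
    exact ⟨hk1, hc1', hb1', ans_update nd discount t ht s1.2 st.2.2 hb1' hans⟩

theorem runB_succ (nd : PySem.Dict String Int) (discount : List String) (t : Nat)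
    (ht : t < discount.length) :
    runB nd discount (t + 1) = stepB nd discount (runB nd discount t) ((t : Int), discount[t]) := by
  unfold runB
  rw [List.take_add_one, List.getElem?_eq_getElem ht]
  simp only [Option.toList_some]
  rw [PySem.List.enumerate_append, List.foldl_append]
  congr 1
  simp [PySem.List.enumerate, List.length_take, Nat.min_eq_left (by omega : t ≤ discount.length)]

theorem InvB_runB (nd : PySem.Dict String Int) (hnd : nd.keys.Nodup)
    (discount : List String) (t : Nat) (ht : t ≤ discount.length) :
    InvB nd discount t (runB nd discount t) := by
  induction t with
  | zero => exact InvB_zero nd hnd discount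
  | succ t ih =>
    rw [runB_succ nd discount t (by omega)]
    exact InvB_step nd hnd discount t (by omega) _ (ih (by omega))

theorem alt_eq_spec (want : List String) (number : List Int) (discount : List String) :
    solution_alt want number discount = specC (ndict want number) discount := by
  have hnd := nd_keys_nodup want number
  have h := InvB_runB (ndict want number) hnd discount discount.length le_rfl
  unfold InvB at h
  have hans := h.2.2.2
  unfold solution_alt specC
  show ((PySem.List.enumerate discount).foldl
      (stepB (ndict want number) discount)
      (cnt0 (ndict want number), bad0 (ndict want number), 0)).2.2 = _
  rw [show (PySem.List.enumerate discount).foldl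
        (stepB (ndict want number) discount)
        (cnt0 (ndict want number), bad0 (ndict want number), 0)
      = runB (ndict want number) discount discount.length by
    unfold runB; rw [List.take_length]]
  exact hans

-- ===== VERDICT (by name: the statement is the Claim_ definition above) =====
theorem solution_spec : Claim_equal_solution := by
  intro want number discount _ hpre
  unfold Spec_solution
  rw [solution_eq_spec want number discount hpre, alt_eq_spec]
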